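-- pv_equiv track=rewrite | github.com/poker26/eas-mcp-server | eas_client.py | parse_emails
-- ===== SOURCE A (Python) =====
-- def parse_emails(elements: list) -> list:
--     emails = []
--     cur = {}
--     for _, tag, value in elements:
--         if tag == "ServerId" and value:
--             if cur.get("subject") or cur.get("from"):
--                 emails.append(cur)
--             cur = {"server_id": value}
--             continue
--         if value is not None:
--             mapping = {
--                 "Subject": "subject", "From": "from", "To": "to",
--                 "Cc": "cc", "DateReceived": "date",
--                 "DisplayTo": "display_to", "Importance": "importance",
--                 "Read": "read", "MessageClass": "class",
--                 "Data": "body", "Preview": "preview",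
--                 "EstimatedDataSize": "size", "ThreadTopic": "thread_topic",
--                 "FileReference": "file_reference",
--                 "DisplayName": "att_display_name",
--                 "AttName": "att_name",
--             }
--             if tag in mapping:
--                 cur[mapping[tag]] = value
--     if cur.get("subject") or cur.get("from"):
--         emails.append(cur)
--     return emails
-- ===== SOURCE B (Python) =====
-- _MAPPING = {
--     "Subject": "subject", "From": "from", "To": "to",
--     "Cc": "cc", "DateReceived": "date",
--     "DisplayTo": "display_to", "Importance": "importance",
--     "Read": "read", "MessageClass": "class",
--     "Data": "body", "Preview": "preview",
--     "EstimatedDataSize": "size", "ThreadTopic": "thread_topic",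
--     "FileReference": "file_reference",
--     "DisplayName": "att_display_name",
--     "AttName": "att_name",
-- }
--
--
-- def _build(segment):
--     cur = {}
--     for _, tag, value in segment:
--         if tag == "ServerId" and value:
--             cur["server_id"] = value
--         elif value is not None and tag in _MAPPING:
--             cur[_MAPPING[tag]] = value
--     return cur
--
--
-- def parse_emails(elements: list) -> list:
--     # phase 1: cut the element stream into segments at each truthy ServerId
--     done = []
--     seg = []
--     for el in elements:
--         if el[1] == "ServerId" and el[2]:
--             done.append(seg)
--             seg = [el]
--         else:
--             seg.append(el)
--     done.append(seg)
--     # phase 2: build a dict per segment, keep those with a subject or sender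
--     return [d for d in map(_build, done) if d.get("subject") or d.get("from")]
-- ===== Notes on version B (the rewrite author's own statement) =====
-- stated objective: alternative
-- what changed: Replaces A's single stateful loop (per-element dict literal, flush-on-boundary with a trailing duplicate flush) by a two-phase decomposition: first cut the element stream into segments at each truthy ServerId, then build one dict per segment with a hoisted module-level mapping and filter the segments by subject/from once.
import Mathlib
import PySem

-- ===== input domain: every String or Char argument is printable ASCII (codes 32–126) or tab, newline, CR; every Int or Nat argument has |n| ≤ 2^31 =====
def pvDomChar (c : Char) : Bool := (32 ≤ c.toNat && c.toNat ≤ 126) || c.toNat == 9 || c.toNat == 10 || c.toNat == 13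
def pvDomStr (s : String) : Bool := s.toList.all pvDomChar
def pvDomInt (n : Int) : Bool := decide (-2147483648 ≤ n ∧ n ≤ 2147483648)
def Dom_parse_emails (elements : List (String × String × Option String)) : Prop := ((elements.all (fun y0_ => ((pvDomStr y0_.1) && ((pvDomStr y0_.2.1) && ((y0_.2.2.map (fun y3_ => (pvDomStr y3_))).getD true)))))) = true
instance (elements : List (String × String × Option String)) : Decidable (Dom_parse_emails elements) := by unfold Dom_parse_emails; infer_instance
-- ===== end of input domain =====

-- B re-decomposes A's single stateful loop into segmentation at truthy ServerId + per-segment dict build + filter (objective: simpler/alternative, same cost).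

-- shared data table: the tag → key mapping (a dict literal in both Pythons)
def pvMapping : PySem.Dict String String := PySem.Dict.ofList
  [("Subject", "subject"), ("From", "from"), ("To", "to"),
   ("Cc", "cc"), ("DateReceived", "date"),
   ("DisplayTo", "display_to"), ("Importance", "importance"),
   ("Read", "read"), ("MessageClass", "class"),
   ("Data", "body"), ("Preview", "preview"),
   ("EstimatedDataSize", "size"), ("ThreadTopic", "thread_topic"),
   ("FileReference", "file_reference"),
   ("DisplayName", "att_display_name"),
   ("AttName", "att_name")]

-- Python truthiness of an Optional[str]
def pvTruthy (v : Option String) : Bool := match v with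
  | some s => s.toList ≠ []
  | none => false

-- cur.get("subject") or cur.get("from")  used as a boolean
def pvKeep (cur : PySem.Dict String String) : Bool :=
  (cur.getD "subject" "").toList ≠ [] || (cur.getD "from" "").toList ≠ []

-- ===== PORT A =====
-- A's loop state is (emails, cur)
def pvStepA (st : List (PySem.Dict String String) × PySem.Dict String String)
    (el : String × String × Option String) :
    List (PySem.Dict String String) × PySem.Dict String String :=
  let tag := el.2.1
  let value := el.2.2
  if tag == "ServerId" && pvTruthy value then
    ((if pvKeep st.2 then st.1 ++ [st.2] else st.1),
     (PySem.Dict.empty).insert "server_id" (value.getD ""))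
  else if value.isSome then
    if (pvMapping.get? tag).isSome then
      (st.1, st.2.insert (pvMapping.getD tag "") (value.getD ""))
    else st
  else st

def parse_emails (elements : List (String × String × Option String)) : List (List (String × String)) :=
  let st := elements.foldl pvStepA ([], PySem.Dict.empty)
  ((if pvKeep st.2 then st.1 ++ [st.2] else st.1)).map (fun d => d.items)

-- ===== PORT B =====
-- phase 2 helper: build one segment's dict
def pvBuild (seg : List (String × String × Option String)) : PySem.Dict String String :=
  seg.foldl (fun cur el =>
    if el.2.1 == "ServerId" && pvTruthy el.2.2 then
      cur.insert "server_id" (el.2.2.getD "")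
    else if el.2.2.isSome && (pvMapping.get? el.2.1).isSome then
      cur.insert (pvMapping.getD el.2.1 "") (el.2.2.getD "")
    else cur) PySem.Dict.empty

-- phase 1 step: cut into segments at each truthy ServerId; state is (done, seg)
def pvStepB (st : List (List (String × String × Option String)) × List (String × String × Option String))
    (el : String × String × Option String) :
    List (List (String × String × Option String)) × List (String × String × Option String) :=
  if el.2.1 == "ServerId" && pvTruthy el.2.2 then (st.1 ++ [st.2], [el]) else (st.1, st.2 ++ [el])

def parse_emails_alt (elements : List (String × String × Option String)) : List (List (String × String)) :=
  let st := elements.foldl pvStepB ([], [])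
  ((((st.1 ++ [st.2]).map pvBuild).filter pvKeep)).map (fun d => d.items)

-- ===== PRECONDITION & SPEC =====
def Spec_parse_emails (elements : List (String × String × Option String)) (out : List (List (String × String))) : Prop := out = parse_emails_alt elements
instance (elements : List (String × String × Option String)) (out : List (List (String × String))) : Decidable (Spec_parse_emails elements out) := by unfold Spec_parse_emails; infer_instance

-- ===== CLAIM (what is proved, stated in full; the proofs are below) =====
def Claim_equal_parse_emails : Prop := ∀ (elements : List (String × String × Option String)), Dom_parse_emails elements → Spec_parse_emails elements (parse_emails elements)

-- ===== LEMMAS AND PROOFS =====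

-- one build step over a segment extended by one element
lemma pvBuild_append (seg : List (String × String × Option String)) (el : String × String × Option String) :
    pvBuild (seg ++ [el]) =
      (if el.2.1 == "ServerId" && pvTruthy el.2.2 then
        (pvBuild seg).insert "server_id" (el.2.2.getD "")
      else if el.2.2.isSome && (pvMapping.get? el.2.1).isSome then
        (pvBuild seg).insert (pvMapping.getD el.2.1 "") (el.2.2.getD "")
      else pvBuild seg) := by
  simp [pvBuild, List.foldl_append]

-- the loop invariant: A's fold state is determined by B's segmentation state
lemma pv_invariant (els : List (String × String × Option String)) :
    ∀ (done : List (List (String × String × Option String))) (seg : List (String × String × Option String)),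
      els.foldl pvStepA (((done.map pvBuild).filter pvKeep), pvBuild seg) =
        ((((els.foldl pvStepB (done, seg)).1.map pvBuild).filter pvKeep),
         pvBuild (els.foldl pvStepB (done, seg)).2) := by
  induction els with
  | nil => intro done seg; rfl
  | cons el rest ih =>
    intro done seg
    by_cases h : (el.2.1 == "ServerId" && pvTruthy el.2.2) = true
    · have hA : pvStepA (((done.map pvBuild).filter pvKeep), pvBuild seg) el =
          ((((done ++ [seg]).map pvBuild).filter pvKeep), pvBuild [el]) := by
        simp [pvStepA, pvBuild, h, List.filter_append]
        split <;> simp_all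
      have hB : pvStepB (done, seg) el = (done ++ [seg], [el]) := by
        simp [pvStepB, h]
      simp only [List.foldl_cons, hA, hB]
      exact ih (done ++ [seg]) [el]
    · have hA : pvStepA (((done.map pvBuild).filter pvKeep), pvBuild seg) el =
          (((done.map pvBuild).filter pvKeep), pvBuild (seg ++ [el])) := by
        rw [pvBuild_append]
        simp only [pvStepA, h, if_neg, Bool.not_eq_true] at *
        by_cases h2 : el.2.2.isSome = true
        · by_cases h3 : (pvMapping.get? el.2.1).isSome = true <;> simp [pvStepA, h, h2, h3]
        · simp [pvStepA, h, h2]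
      have hB : pvStepB (done, seg) el = (done, seg ++ [el]) := by
        simp [pvStepB, h]
      simp only [List.foldl_cons, hA, hB]
      exact ih done (seg ++ [el])

-- ===== VERDICT (by name: the statement is the Claim_ definition above) =====
theorem parse_emails_spec : Claim_equal_parse_emails := by
  intro elements _
  show parse_emails elements = parse_emails_alt elements
  unfold parse_emails parse_emails_alt
  have h := pv_invariant elements [] []
  simp only [List.map_nil, List.filter_nil] at h
  have hempty : pvBuild [] = PySem.Dict.empty := rfl
  rw [hempty] at h
  rw [h]
  simp [List.filter_append, List.map_append]
  split <;> simp_all
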